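-- pv_equiv track=rewrite | github.com/Arn0ldJM/MIIA_estudiante_22 | Laboratorios/Laboratorio 1.py | volver_estructuradatos
-- ===== SOURCE A (Python) =====
-- def volver_estructuradatos(data_trans, datos):
--     iden = []
--     edad = []
--     esco = []
--     estc = []
--     estr = []
--     gene = []
--     prom = []
--     regi = []
--
--     # Reconstruir todos los datos del estudiante
--     for item in data_trans:
--         idest = item[0]
--         iden.append(idest)
--         edad.append(datos[1][idest])
--         esco.append(datos[2][idest])
--         estc.append(datos[3][idest])
--         estr.append(datos[4][idest])
--         gene.append(datos[5][idest])
--         prom.append(datos[6][idest])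
--         regi.append(datos[7][idest])
--
--     return [iden, edad, esco, estc, estr, gene, prom, regi]
-- ===== SOURCE B (Python) =====
-- def volver_estructuradatos(data_trans, datos):
--     # row-major reconstruction: build one full 8-field record per transaction,
--     # then transpose the row table into the eight output columns
--     rows = [[item[0]] + [datos[k][item[0]] for k in range(1, 8)] for item in data_trans]
--     return [[r[k] for r in rows] for k in range(8)]
-- ===== Notes on version B (the rewrite author's own statement) =====
-- stated objective: alternative
-- what changed: A fills eight column accumulators in one interleaved loop; B builds a row-major intermediate table (one complete 8-field record per transaction) and then transposes that table into the eight output columns, a data layout A never materializes.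
import Mathlib
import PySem

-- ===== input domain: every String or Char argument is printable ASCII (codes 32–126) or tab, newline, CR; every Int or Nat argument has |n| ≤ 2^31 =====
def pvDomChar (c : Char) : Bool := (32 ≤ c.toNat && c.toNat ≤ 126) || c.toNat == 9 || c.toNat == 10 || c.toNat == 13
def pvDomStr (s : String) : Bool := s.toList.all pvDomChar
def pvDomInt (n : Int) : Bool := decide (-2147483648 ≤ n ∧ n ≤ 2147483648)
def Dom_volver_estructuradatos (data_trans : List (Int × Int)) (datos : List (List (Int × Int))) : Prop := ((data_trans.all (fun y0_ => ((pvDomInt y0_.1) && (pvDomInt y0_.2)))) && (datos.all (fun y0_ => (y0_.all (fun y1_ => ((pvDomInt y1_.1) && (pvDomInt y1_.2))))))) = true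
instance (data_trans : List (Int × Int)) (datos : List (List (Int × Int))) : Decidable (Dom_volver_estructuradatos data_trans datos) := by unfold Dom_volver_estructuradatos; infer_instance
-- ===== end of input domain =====

-- B builds a row-major table (one 8-field record per transaction) and transposes it,
-- instead of A's single interleaved loop filling eight column accumulators; return value only.

-- dict lookup (first match) on an association list; default 0 is never used inside Pre_
def pvDGet (d : List (Int × Int)) (k : Int) : Int := ((d.find? (fun p => p.1 == k)).map (·.2)).getD 0

-- ===== PORT A =====
def volver_estructuradatos (data_trans : List (Int × Int)) (datos : List (List (Int × Int))) : List (List Int) :=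
  let r := data_trans.foldl
    (fun (s : List Int × List Int × List Int × List Int × List Int × List Int × List Int × List Int) item =>
      let idest := item.1
      (s.1 ++ [idest],
       s.2.1 ++ [pvDGet ((PySem.List.pyGet? datos 1).getD []) idest],
       s.2.2.1 ++ [pvDGet ((PySem.List.pyGet? datos 2).getD []) idest],
       s.2.2.2.1 ++ [pvDGet ((PySem.List.pyGet? datos 3).getD []) idest],
       s.2.2.2.2.1 ++ [pvDGet ((PySem.List.pyGet? datos 4).getD []) idest],
       s.2.2.2.2.2.1 ++ [pvDGet ((PySem.List.pyGet? datos 5).getD []) idest],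
       s.2.2.2.2.2.2.1 ++ [pvDGet ((PySem.List.pyGet? datos 6).getD []) idest],
       s.2.2.2.2.2.2.2 ++ [pvDGet ((PySem.List.pyGet? datos 7).getD []) idest]))
    ([], [], [], [], [], [], [], [])
  [r.1, r.2.1, r.2.2.1, r.2.2.2.1, r.2.2.2.2.1, r.2.2.2.2.2.1, r.2.2.2.2.2.2.1, r.2.2.2.2.2.2.2]

-- ===== PORT B =====
def volver_estructuradatos_alt (data_trans : List (Int × Int)) (datos : List (List (Int × Int))) : List (List Int) :=
  let rows := data_trans.map (fun item =>
    item.1 :: (PySem.List.pyRange 1 8 1).map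
      (fun k => pvDGet ((PySem.List.pyGet? datos k).getD []) item.1))
  (PySem.List.pyRange 0 8 1).map (fun k => rows.map (fun r => (PySem.List.pyGet? r k).getD 0))

-- ===== PRECONDITION & SPEC =====
-- Pre_ excludes exactly the inputs on which Python A raises: a nonempty transaction list
-- with fewer than 8 columns in datos (IndexError) or an id missing from some column's dict (KeyError).
def Pre_volver_estructuradatos (data_trans : List (Int × Int)) (datos : List (List (Int × Int))) : Prop :=
  data_trans = [] ∨
    (8 ≤ datos.length ∧
      ∀ p ∈ data_trans, ∀ k ∈ ([1, 2, 3, 4, 5, 6, 7] : List Nat),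
        (datos.getD k []).any (fun q => q.1 == p.1))
instance (data_trans : List (Int × Int)) (datos : List (List (Int × Int))) : Decidable (Pre_volver_estructuradatos data_trans datos) := by unfold Pre_volver_estructuradatos; infer_instance

def pvWitness_volver_estructuradatos : (List (Int × Int)) × (List (List (Int × Int))) :=
  ([(0, 5), (2, 3)],
   [[(0, 7)], [(0, 10), (2, 11)], [(0, 12), (2, 13)], [(0, 14), (2, 15)], [(0, 16), (2, 17)],
    [(0, 18), (2, 19)], [(0, 20), (2, 21)], [(0, 22), (2, 23)]])

def Spec_volver_estructuradatos (data_trans : List (Int × Int)) (datos : List (List (Int × Int))) (out : List (List Int)) : Prop := out = volver_estructuradatos_alt data_trans datos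
instance (data_trans : List (Int × Int)) (datos : List (List (Int × Int))) (out : List (List Int)) : Decidable (Spec_volver_estructuradatos data_trans datos out) := by unfold Spec_volver_estructuradatos; infer_instance

-- ===== CLAIM =====
def Claim_equal_volver_estructuradatos : Prop := ∀ (data_trans : List (Int × Int)) (datos : List (List (Int × Int))), Dom_volver_estructuradatos data_trans datos → Pre_volver_estructuradatos data_trans datos → Spec_volver_estructuradatos data_trans datos (volver_estructuradatos data_trans datos)

-- ===== LEMMAS AND PROOFS =====

-- A's interleaved fold, characterised: each accumulator grows by the corresponding column map.
theorem volver_foldl_char (datos : List (List (Int × Int))) (dt : List (Int × Int))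
    (a1 a2 a3 a4 a5 a6 a7 a8 : List Int) :
    dt.foldl
      (fun (s : List Int × List Int × List Int × List Int × List Int × List Int × List Int × List Int) item =>
        let idest := item.1
        (s.1 ++ [idest],
         s.2.1 ++ [pvDGet ((PySem.List.pyGet? datos 1).getD []) idest],
         s.2.2.1 ++ [pvDGet ((PySem.List.pyGet? datos 2).getD []) idest],
         s.2.2.2.1 ++ [pvDGet ((PySem.List.pyGet? datos 3).getD []) idest],
         s.2.2.2.2.1 ++ [pvDGet ((PySem.List.pyGet? datos 4).getD []) idest],
         s.2.2.2.2.2.1 ++ [pvDGet ((PySem.List.pyGet? datos 5).getD []) idest],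
         s.2.2.2.2.2.2.1 ++ [pvDGet ((PySem.List.pyGet? datos 6).getD []) idest],
         s.2.2.2.2.2.2.2 ++ [pvDGet ((PySem.List.pyGet? datos 7).getD []) idest]))
      (a1, a2, a3, a4, a5, a6, a7, a8)
    = (a1 ++ dt.map (·.1),
       a2 ++ dt.map (fun p => pvDGet ((PySem.List.pyGet? datos 1).getD []) p.1),
       a3 ++ dt.map (fun p => pvDGet ((PySem.List.pyGet? datos 2).getD []) p.1),
       a4 ++ dt.map (fun p => pvDGet ((PySem.List.pyGet? datos 3).getD []) p.1),
       a5 ++ dt.map (fun p => pvDGet ((PySem.List.pyGet? datos 4).getD []) p.1),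
       a6 ++ dt.map (fun p => pvDGet ((PySem.List.pyGet? datos 5).getD []) p.1),
       a7 ++ dt.map (fun p => pvDGet ((PySem.List.pyGet? datos 6).getD []) p.1),
       a8 ++ dt.map (fun p => pvDGet ((PySem.List.pyGet? datos 7).getD []) p.1)) := by
  induction dt generalizing a1 a2 a3 a4 a5 a6 a7 a8 with
  | nil => simp
  | cons x xs ih =>
    simp only [List.foldl_cons, List.map_cons]
    rw [ih]
    simp [List.append_assoc]

-- ===== VERDICT =====
theorem volver_estructuradatos_spec : Claim_equal_volver_estructuradatos := by
  intro dt datos _ _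
  show _ = _
  unfold volver_estructuradatos volver_estructuradatos_alt
  rw [volver_foldl_char]
  have h1 : (PySem.List.pyRange 1 8 1) = [1, 2, 3, 4, 5, 6, 7] := by decide
  have h0 : (PySem.List.pyRange 0 8 1) = [0, 1, 2, 3, 4, 5, 6, 7] := by decide
  simp [h0, h1, List.map_map, Function.comp, PySem.List.pyGet?, PySem.List.pyIdx?]
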